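-- pv_equiv track=rewrite | github.com/wtfo-guru/dynaddrmgr | dynaddrmgr/dynhost.py | _get_ipv6_prefix
-- ===== SOURCE A (Python) =====
-- def _get_ipv6_prefix(ipv6_addr: str, prefix_len: int) -> str:
--     """Retruns prefix of ipv6 address.
--
--     Parameters
--     ----------
--     ipv6_addr : str
--         The ipv6 address
--     prefix_len : int
--         The length of the prefix
--
--     Returns
--     -------
--     str
--         The ipv6 network prefix
--     """
--     prefix = ""
--     cur_prefix_len = 0
--     prefix_increment = 16
--     ipv6_parts = ipv6_addr.split(":")
--     for part in ipv6_parts: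
--         if prefix:
--             prefix = "{0}:{1}".format(prefix, part)
--         else:
--             prefix = part
--         cur_prefix_len += prefix_increment
--         if int(cur_prefix_len) >= int(prefix_len):
--             return prefix
--     return prefix
-- ===== SOURCE B (Python) =====
-- def _get_ipv6_prefix(ipv6_addr: str, prefix_len: int) -> str:
--     """Return the first ceil(prefix_len/16) colon-groups (at least one) of the address."""
--     parts = ipv6_addr.split(":")
--     n = max(1, -(-prefix_len // 16))
--     return ":".join(parts[:n])
-- ===== Notes on version B (the rewrite author's own statement) =====
-- stated objective: simpler
-- what changed: Replaces A's accumulate-and-early-return loop over the groups by a closed-form group count (ceil division with a minimum of one) followed by a single slice and join.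
-- intended difference: On addresses starting with ':' with prefix_len > 16, A silently drops the leading empty groups (A('::1', 48) = '1'), while B returns the joined truncation '::1'; B's value is the actual textual prefix of the address, which is the function's purpose. — e.g. on _get_ipv6_prefix("::1", 48): A returns "1", B returns "::1"
import Mathlib
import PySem

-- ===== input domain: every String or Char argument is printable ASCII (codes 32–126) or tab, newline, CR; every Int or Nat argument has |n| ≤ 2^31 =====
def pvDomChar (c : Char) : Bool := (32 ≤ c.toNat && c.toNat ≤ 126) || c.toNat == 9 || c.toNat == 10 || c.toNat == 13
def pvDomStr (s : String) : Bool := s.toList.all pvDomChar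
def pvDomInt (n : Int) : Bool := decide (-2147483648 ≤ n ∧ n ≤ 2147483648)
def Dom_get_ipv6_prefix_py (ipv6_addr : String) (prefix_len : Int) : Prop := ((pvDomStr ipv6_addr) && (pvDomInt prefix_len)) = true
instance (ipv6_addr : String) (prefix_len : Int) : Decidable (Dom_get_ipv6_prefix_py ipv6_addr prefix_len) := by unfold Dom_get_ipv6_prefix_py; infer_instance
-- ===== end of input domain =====

-- B replaces A's accumulate-and-early-return loop by a closed-form group count plus one
-- slice-and-join (objective: simpler); on addresses starting with ':' with prefix_len > 16
-- the two differ intentionally (see D_ below).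

-- ===== PORT A =====
-- the for-loop of A: state = (prefix, cur_prefix_len); early return when cur ≥ prefix_len
def pvALoop (prefix_len : Int) : List (List Char) → List Char → Int → List Char
  | [], pfx, _ => pfx
  | part :: rest, pfx, cur =>
    let pfx' := if pfx ≠ [] then pfx ++ ':' :: part else part
    let cur' := cur + 16
    if prefix_len ≤ cur' then pfx' else pvALoop prefix_len rest pfx' cur'

def get_ipv6_prefix_py (ipv6_addr : String) (prefix_len : Int) : String :=
  String.ofList (pvALoop prefix_len (PySem.Chars.splitOn ipv6_addr.toList [':']) [] 0)

-- ===== PORT B =====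
def get_ipv6_prefix_py_alt (ipv6_addr : String) (prefix_len : Int) : String :=
  String.ofList (PySem.Chars.join [':']
    (PySem.List.slice (PySem.Chars.splitOn ipv6_addr.toList [':']) none
      (some (max 1 (-(PySem.Int.floordiv (-prefix_len) 16))))))

-- ===== PRECONDITION & SPEC =====
-- On addresses starting with ':' with prefix_len > 16, A silently drops the leading empty
-- groups (A "::1" 48 = "1"), while B returns the joined truncation "::1"; B's value is the
-- actual textual prefix of the address, which is the function's purpose.
def D_get_ipv6_prefix_py (ipv6_addr : String) (prefix_len : Int) : Prop :=
  PySem.Str.startswith ipv6_addr ":" = true ∧ 16 < prefix_len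
instance (ipv6_addr : String) (prefix_len : Int) : Decidable (D_get_ipv6_prefix_py ipv6_addr prefix_len) := by unfold D_get_ipv6_prefix_py; infer_instance

def Spec_get_ipv6_prefix_py (ipv6_addr : String) (prefix_len : Int) (out : String) : Prop := ¬ D_get_ipv6_prefix_py ipv6_addr prefix_len → out = get_ipv6_prefix_py_alt ipv6_addr prefix_len
instance (ipv6_addr : String) (prefix_len : Int) (out : String) : Decidable (Spec_get_ipv6_prefix_py ipv6_addr prefix_len out) := by unfold Spec_get_ipv6_prefix_py; infer_instance

def pvDiffWitness_get_ipv6_prefix_py : String × Int := ("::1", 48)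
def pvDiffWitnessOut_get_ipv6_prefix_py : String × String := ("1", "::1")

-- ===== CLAIM (what is proved, stated in full; the proofs are below) =====
def Claim_unchanged_get_ipv6_prefix_py : Prop := ∀ (ipv6_addr : String) (prefix_len : Int), Dom_get_ipv6_prefix_py ipv6_addr prefix_len → Spec_get_ipv6_prefix_py ipv6_addr prefix_len (get_ipv6_prefix_py ipv6_addr prefix_len)
def Claim_exact_get_ipv6_prefix_py : Prop := ∀ (ipv6_addr : String) (prefix_len : Int), Dom_get_ipv6_prefix_py ipv6_addr prefix_len → D_get_ipv6_prefix_py ipv6_addr prefix_len → get_ipv6_prefix_py ipv6_addr prefix_len ≠ get_ipv6_prefix_py_alt ipv6_addr prefix_len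
def Claim_changed_get_ipv6_prefix_py : Prop := Dom_get_ipv6_prefix_py (pvDiffWitness_get_ipv6_prefix_py.1) (pvDiffWitness_get_ipv6_prefix_py.2) ∧ D_get_ipv6_prefix_py (pvDiffWitness_get_ipv6_prefix_py.1) (pvDiffWitness_get_ipv6_prefix_py.2) ∧ get_ipv6_prefix_py (pvDiffWitness_get_ipv6_prefix_py.1) (pvDiffWitness_get_ipv6_prefix_py.2) = pvDiffWitnessOut_get_ipv6_prefix_py.1 ∧ get_ipv6_prefix_py_alt (pvDiffWitness_get_ipv6_prefix_py.1) (pvDiffWitness_get_ipv6_prefix_py.2) = pvDiffWitnessOut_get_ipv6_prefix_py.2 ∧ pvDiffWitnessOut_get_ipv6_prefix_py.1 ≠ pvDiffWitnessOut_get_ipv6_prefix_py.2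

-- ===== LEMMAS AND PROOFS =====

-- splitOn.go with an arbitrary accumulator = accumulator (reversed) ++ go with the empty one
theorem pv_go_acc (sep : List Char) : ∀ (fuel : Nat) (l cur : List Char) (acc : List (List Char)),
    PySem.Chars.splitOn.go sep fuel l cur acc
      = acc.reverse ++ PySem.Chars.splitOn.go sep fuel l cur [] := by
  intro fuel
  induction fuel with
  | zero => intro l cur acc; simp [PySem.Chars.splitOn.go]
  | succ n ih =>
    intro l cur acc
    cases l with
    | nil => simp [PySem.Chars.splitOn.go]
    | cons c rest =>
      simp only [PySem.Chars.splitOn.go]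
      by_cases hp : sep.isPrefixOf (c :: rest) = true
      · simp only [hp, if_true]
        rw [ih _ _ (cur.reverse :: acc), ih _ _ (cur.reverse :: [])]
        simp
      · simp only [hp]
        rw [if_neg (by simp), if_neg (by simp), ih _ _ acc]

-- the first piece emitted by splitOn.go starts with the pending chunk
theorem pv_go_head (sep : List Char) : ∀ (fuel : Nat) (l cur : List Char),
    ∃ t rest, PySem.Chars.splitOn.go sep fuel l cur [] = (cur.reverse ++ t) :: rest := by
  intro fuel
  induction fuel with
  | zero => intro l cur; exact ⟨l, [], by simp [PySem.Chars.splitOn.go]⟩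
  | succ n ih =>
    intro l cur
    cases l with
    | nil => exact ⟨[], [], by simp [PySem.Chars.splitOn.go]⟩
    | cons c rest =>
      by_cases hp : sep.isPrefixOf (c :: rest) = true
      · refine ⟨[], PySem.Chars.splitOn.go sep n (List.drop sep.length (c :: rest)) [] [], ?_⟩
        simp only [PySem.Chars.splitOn.go, hp, if_true]
        rw [pv_go_acc]
        simp
      · obtain ⟨t, r, ht⟩ := ih rest (c :: cur)
        refine ⟨c :: t, r, ?_⟩
        simp only [PySem.Chars.splitOn.go, hp]
        rw [ht]
        simp

theorem pv_splitOn_cons_ne (c : Char) (cs : List Char) (hcne : c ≠ ':') :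
    ∃ t rest, PySem.Chars.splitOn (c :: cs) [':'] = (c :: t) :: rest := by
  have hp : ([':'] : List Char).isPrefixOf (c :: cs) = false := by
    simp [List.isPrefixOf]
    intro h; exact absurd h.symm hcne
  show ∃ t rest, PySem.Chars.splitOn.go [':'] ((c :: cs).length + 1) (c :: cs) [] [] = (c :: t) :: rest
  simp only [List.length_cons, PySem.Chars.splitOn.go, hp]
  obtain ⟨t, r, ht⟩ := pv_go_head [':'] (cs.length + 1) cs [c]
  exact ⟨t, r, by rw [if_neg (by simp), ht]; simp⟩

theorem pv_splitOn_ne_nil (s : List Char) :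
    ∃ h t, PySem.Chars.splitOn s [':'] = h :: t := by
  obtain ⟨t, r, ht⟩ := pv_go_head [':'] (s.length + 1) s []
  exact ⟨t, r, by simpa [PySem.Chars.splitOn] using ht⟩

-- A's loop, started with a nonempty prefix, is a join of the prefix and the right number of parts
theorem pv_loopA_join (plen : Int) (parts : List (List Char)) :
    ∀ (pfx : List Char) (cur : Int), pfx ≠ [] →
    pvALoop plen parts pfx cur
      = PySem.Chars.join [':'] (pfx :: parts.take (max 1 (-((cur - plen)/16))).toNat) := by
  induction parts with
  | nil =>
    intro pfx cur _
    simp [pvALoop, PySem.Chars.join_singleton]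
  | cons p rest ih =>
    intro pfx cur h
    by_cases hle : plen ≤ cur + 16
    · have hk : (max 1 (-((cur - plen)/16))).toNat = 1 := by omega
      rw [hk]
      simp only [pvALoop, h, if_true, ne_eq, not_false_iff, if_pos hle, List.take_succ_cons,
        List.take_zero]
      rw [PySem.Chars.join_cons_cons, PySem.Chars.join_singleton]
      simp
    · have hk : (max 1 (-((cur - plen)/16))).toNat
          = (max 1 (-((cur + 16 - plen)/16))).toNat + 1 := by omega
      rw [hk]
      simp only [pvALoop, h, if_true, ne_eq, not_false_iff, if_neg hle, List.take_succ_cons]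
      rw [ih (pfx ++ ':' :: p) (cur + 16) (by simp), PySem.Chars.join_cons_cons]
      cases hrest : rest.take (max 1 (-((cur + 16 - plen)/16))).toNat with
      | nil => rw [PySem.Chars.join_singleton, PySem.Chars.join_singleton]; simp
      | cons q l => rw [PySem.Chars.join_cons_cons, PySem.Chars.join_cons_cons]; simp

theorem pv_fd (a : Int) : PySem.Int.floordiv a 16 = a / 16 := by
  show a.fdiv 16 = a / 16
  rw [Int.fdiv_eq_ediv]
  norm_num

-- no piece produced by splitOn on ':' contains ':'
theorem pv_go_nosep : ∀ (fuel : Nat) (l cur : List Char), l.length < fuel → (':' ∉ cur) →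
    ∀ x ∈ PySem.Chars.splitOn.go [':'] fuel l cur [], ':' ∉ x := by
  intro fuel
  induction fuel with
  | zero => intro l cur h; exact absurd h (by omega)
  | succ n ih =>
    intro l cur hlen hcur
    cases l with
    | nil =>
      intro x hx
      simp only [PySem.Chars.splitOn.go] at hx
      simp only [List.reverse_cons, List.reverse_nil, List.nil_append, List.mem_singleton] at hx
      subst hx
      simpa using hcur
    | cons c rest =>
      intro x hx
      by_cases hp : ([':'] : List Char).isPrefixOf (c :: rest) = true
      · simp only [PySem.Chars.splitOn.go, hp, if_true] at hx
        rw [pv_go_acc] at hx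
        simp only [List.length_cons, List.length_nil, Nat.zero_add, List.drop_succ_cons,
          List.drop_zero, List.reverse_cons, List.reverse_nil, List.nil_append,
          List.mem_append, List.mem_singleton] at hx
        rcases hx with h1 | h2
        · subst h1; simpa using hcur
        · exact ih rest [] (by simpa using hlen) (by simp) x h2
      · have hc : c ≠ ':' := by
          intro h; apply hp; simp [List.isPrefixOf, h]
        simp only [PySem.Chars.splitOn.go, hp] at hx
        rw [if_neg (by simp)] at hx
        refine ih rest (c :: cur) (by simpa using hlen) ?_ x hx
        intro hmem
        rcases List.mem_cons.mp hmem with h | h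
        · exact hc h.symm
        · exact hcur h

theorem pv_splitOn_nosep (s : List Char) :
    ∀ x ∈ PySem.Chars.splitOn s [':'], ':' ∉ x :=
  pv_go_nosep (s.length + 1) s [] (by omega) (by simp)

-- splitting an address that starts with ':' yields a leading empty piece and at least one more
theorem pv_splitOn_colon_cons (cs : List Char) :
    ∃ q r, PySem.Chars.splitOn (':' :: cs) [':'] = [] :: q :: r := by
  have hp : ([':'] : List Char).isPrefixOf (':' :: cs) = true := by simp [List.isPrefixOf]
  obtain ⟨t, r, ht⟩ := pv_go_head [':'] (cs.length + 1) cs []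
  refine ⟨t, r, ?_⟩
  show PySem.Chars.splitOn.go [':'] ((':' :: cs).length + 1) (':' :: cs) [] [] = _
  simp only [List.length_cons, PySem.Chars.splitOn.go, hp, if_true]
  rw [pv_go_acc]
  simp only [List.length_nil, Nat.zero_add, List.drop_succ_cons,
    List.drop_zero, List.reverse_cons, List.reverse_nil, List.nil_append]
  rw [ht]
  simp

-- A's loop keeps the invariant: the result is empty or starts with a non-separator character
theorem pv_loopA_head (plen : Int) : ∀ (parts : List (List Char)) (pfx : List Char) (cur : Int),
    (∀ x ∈ parts, ':' ∉ x) →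
    (pfx = [] ∨ ∃ d l, pfx = d :: l ∧ d ≠ ':') →
    (pvALoop plen parts pfx cur = [] ∨
      ∃ d l, pvALoop plen parts pfx cur = d :: l ∧ d ≠ ':') := by
  intro parts
  induction parts with
  | nil => intro pfx cur _ h; simpa [pvALoop] using h
  | cons p rest ih =>
    intro pfx cur hparts h
    have hP' : ((if pfx ≠ [] then pfx ++ ':' :: p else p) = [] ∨
        ∃ d l, (if pfx ≠ [] then pfx ++ ':' :: p else p) = d :: l ∧ d ≠ ':') := by
      rcases h with h0 | ⟨d, l, hdl, hd⟩
      · subst h0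
        rw [if_neg (by simp)]
        cases hp : p with
        | nil => exact Or.inl rfl
        | cons a as =>
          refine Or.inr ⟨a, as, rfl, fun ha => ?_⟩
          exact (hparts p (by simp)) (by rw [hp, ha]; simp)
      · subst hdl
        exact Or.inr ⟨d, l ++ ':' :: p, by rw [if_pos (by simp)]; simp, hd⟩
    simp only [pvALoop]
    split
    · exact hP'
    · exact ih _ _ (fun x hx => hparts x (by simp [hx])) hP'

theorem pv_loopA_first_le (plen : Int) (p : List Char) (rest : List (List Char))
    (h : plen ≤ 16) : pvALoop plen (p :: rest) [] 0 = p := by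
  simp [pvALoop, h]

theorem pv_loopA_first (plen : Int) (p : List Char) (rest : List (List Char))
    (h : ¬ plen ≤ 16) : pvALoop plen (p :: rest) [] 0 = pvALoop plen rest p 16 := by
  simp [pvALoop, h]

-- ===== VERDICT (by name: the statement is the Claim_ definition above) =====
theorem get_ipv6_prefix_py_spec : Claim_unchanged_get_ipv6_prefix_py := by
  intro addr plen _ hnd
  unfold get_ipv6_prefix_py get_ipv6_prefix_py_alt
  have hn1 : (1 : Int) ≤ max 1 (-(PySem.Int.floordiv (-plen) 16)) := le_max_left _ _
  rw [PySem.List.slice_to _ (by omega)]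
  congr 1
  obtain ⟨p0, rest, hsplit⟩ := pv_splitOn_ne_nil addr.toList
  by_cases hle : plen ≤ 16
  · -- one group: the loop returns after the first part; B takes one part
    have hn : (max 1 (-(PySem.Int.floordiv (-plen) 16))).toNat = 1 := by
      rw [pv_fd]; omega
    rw [hsplit, hn, pv_loopA_first_le _ _ _ hle]
    simp [List.take_succ_cons, PySem.Chars.join_singleton]
  · -- prefix_len > 16 and (since ¬D_) the address does not start with ':'
    have hns : ¬ ([':'] <+: addr.toList) := by
      intro hpre
      apply hnd
      refine ⟨?_, by omega⟩
      have hsw : PySem.Chars.startswith addr.toList [':'] = true :=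
        (PySem.Chars.startswith_iff _ _).2 hpre
      simpa using hsw
    cases hlst : addr.toList with
    | nil =>
      -- empty address: both sides are the empty string's single empty group
      have : PySem.Chars.splitOn ([] : List Char) [':'] = [[]] := rfl
      have hn : 1 ≤ (max 1 (-(PySem.Int.floordiv (-plen) 16))).toNat := by rw [pv_fd]; omega
      rw [this, pv_loopA_first _ _ _ hle, List.take_of_length_le (by simp)]
      simp [pvALoop, PySem.Chars.join_singleton]
    | cons c cs =>
      have hc : c ≠ ':' := by
        intro h; exact hns (by rw [hlst, h]; exact ⟨cs, rfl⟩)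
      obtain ⟨t, r, ht⟩ := pv_splitOn_cons_ne c cs hc
      rw [ht, pv_loopA_first _ _ _ hle, pv_loopA_join plen r (c :: t) 16 (by simp)]
      have hk : (max 1 (-(PySem.Int.floordiv (-plen) 16))).toNat
          = (max 1 (-(((16:Int) - plen)/16))).toNat + 1 := by rw [pv_fd]; omega
      rw [hk, List.take_succ_cons]

theorem get_ipv6_prefix_py_changed : Claim_changed_get_ipv6_prefix_py := by
  unfold Claim_changed_get_ipv6_prefix_py; decide

theorem get_ipv6_prefix_py_tight : Claim_exact_get_ipv6_prefix_py := by
  intro addr plen _ hd heq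
  obtain ⟨hsw, hgt⟩ := hd
  obtain ⟨cs, hcs⟩ : ∃ cs, addr.toList = ':' :: cs := by
    have hsw' : PySem.Chars.startswith addr.toList [':'] = true := by simpa using hsw
    obtain ⟨u, hu⟩ := (PySem.Chars.startswith_iff _ _).1 hsw'
    exact ⟨u, by simpa using hu.symm⟩
  obtain ⟨q, r, hqr⟩ := pv_splitOn_colon_cons cs
  have hlist := congrArg String.toList heq
  rw [get_ipv6_prefix_py, get_ipv6_prefix_py_alt, String.toList_ofList, String.toList_ofList,
    PySem.List.slice_to _ (by omega : (0:Int) ≤ max 1 (-(PySem.Int.floordiv (-plen) 16))),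
    hcs, hqr] at hlist
  -- B's char list starts with ':'
  obtain ⟨k, hk⟩ : ∃ k, (max 1 (-(PySem.Int.floordiv (-plen) 16))).toNat = k + 2 := by
    have := pv_fd (-plen); exact ⟨(max 1 (-(PySem.Int.floordiv (-plen) 16))).toNat - 2, by omega⟩
  rw [hk, List.take_succ_cons, List.take_succ_cons, PySem.Chars.join_cons_cons] at hlist
  simp only [List.nil_append, List.cons_append, List.nil_append] at hlist
  -- A's char list is empty or starts with a non-':' character
  have hA := pv_loopA_head plen (PySem.Chars.splitOn (':' :: cs) [':']) [] 0
    (pv_splitOn_nosep (':' :: cs)) (Or.inl rfl)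
  rw [hqr] at hA
  rcases hA with h0 | ⟨d, l, hdl, hdne⟩
  · rw [h0] at hlist; simp at hlist
  · rw [hdl] at hlist
    exact hdne (List.head_eq_of_cons_eq hlist)
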